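-- pv_equiv track=rewrite | github.com/Kavanyy/OSED-tool-kit | tools/patternTool.py | create_pattern
-- ===== SOURCE A (Python) =====
-- from itertools import product
--
-- CHARSET_MAP = {
--     'upper': "ABCDEFGHIJKLMNOPQRSTUVWXYZ",
--     'lower': "abcdefghijklmnopqrstuvwxyz",
--     'digit': "0123456789",
--     'symbol': "!$%&()*+,-./:;<=>?@[\]^_`{|}~"
-- }
--
-- def create_pattern(length, charsets):
--     # validate charsets
--     sets = []
--     for name in charsets:
--         if name not in CHARSET_MAP:
--             raise ValueError(f"Charset desconocido: {name}")
--         sets.append(CHARSET_MAP[name])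
--
--     # if only 1 repeat
--     if len(sets) == 1:
--         charset = sets[0]
--         return (charset * ((length // len(charset)) + 1))[:length]
--
--     # if multiple, cartesian product
--     token_length = len(sets)
--     max_comb = 1
--     for s in sets:
--         max_comb *= len(s)
--     max_length = max_comb * token_length
--     if length > max_length:
--         raise ValueError(f"Máximo sin repeticiones: {max_length} bytes. Pediste {length}.")
--
--     pattern_parts = []
--     for combo in product(*sets):
--         token = ''.join(combo)
--         pattern_parts.append(token)
--         if len(pattern_parts) * token_length >= length:
--             return ''.join(pattern_parts)[:length]
--     return ''.join(pattern_parts)[:length]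
-- ===== SOURCE B (Python) =====
-- CHARSET_MAP = {
--     'upper': "ABCDEFGHIJKLMNOPQRSTUVWXYZ",
--     'lower': "abcdefghijklmnopqrstuvwxyz",
--     'digit': "0123456789",
--     'symbol': "!$%&()*+,-./:;<=>?@[\]^_`{|}~"
-- }
--
-- def create_pattern(length, charsets):
--     sets = []
--     for name in charsets:
--         if name not in CHARSET_MAP:
--             raise ValueError(f"Charset desconocido: {name}")
--         sets.append(CHARSET_MAP[name])
--
--     if len(sets) == 1:
--         charset = sets[0]
--         return (charset * ((length // len(charset)) + 1))[:length]
--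
--     token_length = len(sets)
--     max_comb = 1
--     for s in sets:
--         max_comb *= len(s)
--     max_length = max_comb * token_length
--     if length > max_length:
--         raise ValueError(f"Máximo sin repeticiones: {max_length} bytes. Pediste {length}.")
--
--     # mixed-radix: token i is the i-th element of product(*sets); the last
--     # charset varies fastest, so peel digits off the rightmost radix first.
--     n = -(-length // token_length) if token_length > 0 and length > 0 else 0
--     chars = []
--     for i in range(n):
--         x = i
--         token = []
--         for s in reversed(sets):
--             x, r = divmod(x, len(s))
--             token.append(s[r])
--         chars.extend(reversed(token))
--     return ''.join(chars)[:length]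
-- ===== Notes on version B (the rewrite author's own statement) =====
-- stated objective: alternative
-- what changed: The multi-charset case replaces the lazy itertools.product iterator with direct mixed-radix indexing: token i is computed by successive divmod over the charset lengths (last charset fastest), and the token count ceil(length/token_length) is computed up front instead of testing after each append.
-- intended difference: For multi-charset calls with -len(charsets) < length < 0, A returns a nonempty fragment of the first token (the negative length reaches Python's negative-slice rule and drops characters from the end), while B returns '' — the intended result when at most zero bytes are requested. — e.g. on create_pattern(-1, ["digit", "digit"]): A returns "0", B returns ""
import Mathlib
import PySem

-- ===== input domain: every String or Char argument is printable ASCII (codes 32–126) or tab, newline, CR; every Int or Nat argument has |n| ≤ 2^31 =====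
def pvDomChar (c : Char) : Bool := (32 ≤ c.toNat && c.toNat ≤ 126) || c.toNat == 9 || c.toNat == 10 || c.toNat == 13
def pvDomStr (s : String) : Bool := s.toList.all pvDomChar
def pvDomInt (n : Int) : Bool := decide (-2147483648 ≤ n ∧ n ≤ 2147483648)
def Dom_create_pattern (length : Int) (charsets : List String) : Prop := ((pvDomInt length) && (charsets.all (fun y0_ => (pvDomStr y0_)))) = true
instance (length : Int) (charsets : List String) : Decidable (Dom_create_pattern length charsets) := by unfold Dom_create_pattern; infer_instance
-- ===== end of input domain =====

-- B replaces the lazy itertools.product iterator with direct mixed-radix indexing of the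
-- i-th token (last charset varies fastest), computing the needed token count up front.

-- ===== PORT A =====

def pvCHARSET_MAP : PySem.Dict String String := PySem.Dict.mk
  [("upper", "ABCDEFGHIJKLMNOPQRSTUVWXYZ"),
   ("lower", "abcdefghijklmnopqrstuvwxyz"),
   ("digit", "0123456789"),
   ("symbol", "!$%&()*+,-./:;<=>?@[\\]^_`{|}~")]

-- the validation loop: none = the ValueError on an unknown charset name
def pvValidateA : List String → Option (List String)
  | [] => some []
  | n :: rest =>
    match pvCHARSET_MAP.get? n with
    | none => none
    | some s => (pvValidateA rest).map (s :: ·)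

-- the `for combo in product(*sets)` loop with its early return, as a DFS carrying
-- (pattern_parts, returned?); combos are produced in product's lexicographic order
def pvProdLoopA (length tl : Int) : List (List Char) → List Char → List String × Bool → List String × Bool
  | [], pre, st =>
    if st.2 then st else
      let parts := st.1 ++ [String.ofList pre]
      (parts, decide (((parts.length : Int)) * tl ≥ length))
  | s :: rest, pre, st =>
    s.foldl (fun acc c => if acc.2 then acc else pvProdLoopA length tl rest (pre ++ [c]) acc) st

def create_pattern (length : Int) (charsets : List String) : String :=
  match pvValidateA charsets with
  | none => ""  -- ValueError: unknown charset (outside Pre_)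
  | some sets =>
    if sets.length = 1 then
      let charset := sets.headD ""
      PySem.Str.slice (String.ofList (PySem.List.pyRepeat charset.toList (PySem.Int.floordiv length ((charset.toList.length : Int)) + 1))) none (some length)
    else
      let token_length : Int := (sets.length : Int)
      let max_comb : Int := sets.foldl (fun a s => a * ((s.toList.length : Int))) 1
      let max_length := max_comb * token_length
      if length > max_length then ""  -- ValueError: too long (outside Pre_)
      else
        let parts := (pvProdLoopA length token_length (sets.map String.toList) [] ([], false)).1
        PySem.Str.slice (PySem.Str.join "" parts) none (some length)

-- ===== PORT B =====

-- B's validation: look every name up once; none = the ValueError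
def pvValidateB (charsets : List String) : Option (List String) :=
  charsets.mapM (fun n => pvCHARSET_MAP.get? n)

-- `for s in reversed(sets): x, r = divmod(x, len(s)); token.append(s[r])` then reversed(token);
-- s[r] is exact as getD since 0 ≤ r < len(s) always (r is a remainder by len(s) > 0)
def pvTokenB (setsC : List (List Char)) (x : Int) : List Char :=
  (setsC.reverse.foldl
    (fun (st : Int × List Char) s =>
      (PySem.Int.floordiv st.1 ((s.length : Int)),
       st.2 ++ [s.getD (PySem.Int.mod st.1 ((s.length : Int))).toNat ' '])) (x, [])).2.reverse

def create_pattern_alt (length : Int) (charsets : List String) : String :=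
  match pvValidateB charsets with
  | none => ""  -- ValueError: unknown charset (outside Pre_)
  | some sets =>
    if sets.length = 1 then
      let charset := sets.headD ""
      PySem.Str.slice (String.ofList (PySem.List.pyRepeat charset.toList (PySem.Int.floordiv length ((charset.toList.length : Int)) + 1))) none (some length)
    else
      let token_length : Int := (sets.length : Int)
      let max_comb : Int := sets.foldl (fun a s => a * ((s.toList.length : Int))) 1
      let max_length := max_comb * token_length
      if length > max_length then ""  -- ValueError: too long (outside Pre_)
      else
        let n : Int := if 0 < token_length ∧ 0 < length then -(PySem.Int.floordiv (-length) token_length) else 0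
        let chars := (PySem.List.pyRange 0 n 1).foldl (fun acc i => acc ++ pvTokenB (sets.map String.toList) i) []
        PySem.Str.slice (String.ofList chars) none (some length)

-- ===== PRECONDITION & SPEC =====

-- length of the charset a valid name denotes (used only by Pre_)
def pvCsLen (n : String) : Int := if n = "digit" then 10 else if n = "symbol" then 29 else 26

-- Pre_ excludes exactly A's two ValueErrors: an unknown charset name, and (in the
-- multi-charset branch) a length exceeding max_comb * token_length
def Pre_create_pattern (length : Int) (charsets : List String) : Prop :=
  (∀ n ∈ charsets, n = "upper" ∨ n = "lower" ∨ n = "digit" ∨ n = "symbol") ∧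
  (charsets.length = 1 ∨ length ≤ (charsets.foldl (fun a n => a * pvCsLen n) 1) * (charsets.length : Int))
instance (length : Int) (charsets : List String) : Decidable (Pre_create_pattern length charsets) := by unfold Pre_create_pattern; infer_instance

def pvWitness_create_pattern : Int × List String := (7, ["digit", "upper"])

-- For multi-charset calls with -len(charsets) < length < 0, A returns a nonempty fragment of the
-- first token (the negative length reaches Python's negative-slice rule and drops characters from
-- the end), while B returns "" — the intended result when at most zero bytes are requested.
def D_create_pattern (length : Int) (charsets : List String) : Prop :=
  (∀ n ∈ charsets, n = "upper" ∨ n = "lower" ∨ n = "digit" ∨ n = "symbol") ∧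
  2 ≤ charsets.length ∧ -(charsets.length : Int) < length ∧ length < 0
instance (length : Int) (charsets : List String) : Decidable (D_create_pattern length charsets) := by unfold D_create_pattern; infer_instance

def Spec_create_pattern (length : Int) (charsets : List String) (out : String) : Prop :=
  ¬ D_create_pattern length charsets → out = create_pattern_alt length charsets
instance (length : Int) (charsets : List String) (out : String) : Decidable (Spec_create_pattern length charsets out) := by unfold Spec_create_pattern; infer_instance

def pvDiffWitness_create_pattern : Int × List String := (-1, ["digit", "digit"])
def pvDiffWitnessOut_create_pattern : String × String := ("0", "")

-- ===== CLAIM (what is proved, stated in full; the proofs are below) =====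
def Claim_unchanged_create_pattern : Prop := ∀ (length : Int) (charsets : List String), Dom_create_pattern length charsets → Pre_create_pattern length charsets → Spec_create_pattern length charsets (create_pattern length charsets)
def Claim_changed_create_pattern : Prop := Dom_create_pattern (pvDiffWitness_create_pattern.1) (pvDiffWitness_create_pattern.2) ∧ Pre_create_pattern (pvDiffWitness_create_pattern.1) (pvDiffWitness_create_pattern.2) ∧ D_create_pattern (pvDiffWitness_create_pattern.1) (pvDiffWitness_create_pattern.2) ∧ create_pattern (pvDiffWitness_create_pattern.1) (pvDiffWitness_create_pattern.2) = pvDiffWitnessOut_create_pattern.1 ∧ create_pattern_alt (pvDiffWitness_create_pattern.1) (pvDiffWitness_create_pattern.2) = pvDiffWitnessOut_create_pattern.2 ∧ pvDiffWitnessOut_create_pattern.1 ≠ pvDiffWitnessOut_create_pattern.2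
def Claim_exact_create_pattern : Prop := ∀ (length : Int) (charsets : List String), Dom_create_pattern length charsets → Pre_create_pattern length charsets → D_create_pattern length charsets → create_pattern length charsets ≠ create_pattern_alt length charsets

-- ===== LEMMAS AND PROOFS =====


-- ---- proof-side helpers ----

-- the charset a valid name denotes
def pvCs (n : String) : String :=
  if n = "digit" then "0123456789"
  else if n = "symbol" then "!$%&()*+,-./:;<=>?@[\\]^_`{|}~"
  else if n = "lower" then "abcdefghijklmnopqrstuvwxyz"
  else "ABCDEFGHIJKLMNOPQRSTUVWXYZ"

def pvValid (n : String) : Prop := n = "upper" ∨ n = "lower" ∨ n = "digit" ∨ n = "symbol"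

-- the full product(*sets) token list, in itertools.product order
def prodT : List (List Char) → List (List Char)
  | [] => [[]]
  | s :: rest => s.flatMap (fun c => (prodT rest).map (c :: ·))

-- A's append-with-early-stop loop, flattened to a fold over the token stream
def stepF (L tl : Int) (st : List String × Bool) (toks : List (List Char)) : List String × Bool :=
  toks.foldl (fun st t =>
    if st.2 then st else
      let parts := st.1 ++ [String.ofList t]
      (parts, decide (((parts.length : Int)) * tl ≥ L))) st

-- how many tokens A appends, given c already appended
def takeCount (L tl : Int) (c : Nat) : List (List Char) → Nat
  | [] => 0
  | _ :: ts => if ((c : Int) + 1) * tl ≥ L then 1 else 1 + takeCount L tl (c + 1) ts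

lemma pvCs_get (n : String) (h : pvValid n) : pvCHARSET_MAP.get? n = some (pvCs n) := by
  rcases h with h | h | h | h <;> subst h <;> decide

lemma pvCs_len (n : String) (h : pvValid n) : ((pvCs n).toList.length : Int) = pvCsLen n := by
  rcases h with h | h | h | h <;> subst h <;> decide

lemma pvCs_ne_nil (n : String) (h : pvValid n) : (pvCs n).toList ≠ [] := by
  rcases h with h | h | h | h <;> subst h <;> decide

lemma validateA_some (cs : List String) (h : ∀ n ∈ cs, pvValid n) :
    pvValidateA cs = some (cs.map pvCs) := by
  induction cs with
  | nil => rfl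
  | cons n rest ih =>
    have hn := pvCs_get n (h n (by simp))
    simp [pvValidateA, hn, ih (fun m hm => h m (by simp [hm]))]

lemma validateB_eq (cs : List String) : pvValidateB cs = pvValidateA cs := by
  induction cs with
  | nil => rfl
  | cons n rest ih =>
    simp only [pvValidateB, List.mapM_cons] at *
    cases h : pvCHARSET_MAP.get? n <;>
      simp [pvValidateA, h, ih, Option.map_eq_bind]

lemma stepF_done (L tl : Int) (toks : List (List Char)) (st : List String × Bool)
    (h : st.2 = true) : stepF L tl st toks = st := by
  induction toks generalizing st with
  | nil => rfl
  | cons t ts ih =>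
    simp only [stepF, List.foldl_cons, h, if_true]
    exact ih st h

lemma stepF_append (L tl : Int) (l1 l2 : List (List Char)) (st : List String × Bool) :
    stepF L tl st (l1 ++ l2) = stepF L tl (stepF L tl st l1) l2 := by
  simp [stepF, List.foldl_append]

lemma prodLoopA_eq (L tl : Int) (sets : List (List Char)) :
    ∀ (pre : List Char) (st : List String × Bool),
    pvProdLoopA L tl sets pre st = stepF L tl st ((prodT sets).map (pre ++ ·)) := by
  induction sets with
  | nil =>
    intro pre st
    simp [pvProdLoopA, prodT, stepF]
  | cons s rest ih =>
    intro pre st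
    simp only [pvProdLoopA, prodT, List.map_flatMap]
    have hmap : ∀ c : Char, ((prodT rest).map (c :: ·)).map (pre ++ ·)
        = (prodT rest).map ((pre ++ [c]) ++ ·) := by
      intro c; simp [List.map_map, Function.comp_def]
    induction s generalizing st with
    | nil => rfl
    | cons c s' ihs =>
      simp only [List.flatMap_cons, List.foldl_cons, stepF_append]
      rw [← ihs (stepF L tl st (((prodT rest).map (c :: ·)).map (pre ++ ·)))]
      congr 1
      by_cases h : st.2 = true
      · rw [if_pos h, stepF_done _ _ _ _ h]
      · rw [if_neg h, ih (pre ++ [c]) st, hmap c]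

lemma stepF_false (L tl : Int) (toks : List (List Char)) :
    ∀ parts : List String,
    (stepF L tl (parts, false) toks).1
      = parts ++ ((toks.take (takeCount L tl parts.length toks)).map String.ofList) := by
  induction toks with
  | nil => intro parts; simp [stepF, takeCount]
  | cons t ts ih =>
    intro parts
    simp only [stepF, List.foldl_cons, Bool.false_eq_true, if_false]
    by_cases h : ((parts.length : Int) + 1) * tl ≥ L
    · have hd : decide (((parts ++ [String.ofList t]).length : Int) * tl ≥ L) = true := by
        simp [h]
      rw [hd]
      have := stepF_done L tl ts (parts ++ [String.ofList t], true) rfl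
      simp only [stepF] at this
      rw [this]
      simp [takeCount, h]
    · have hd : decide (((parts ++ [String.ofList t]).length : Int) * tl ≥ L) = false := by
        simp only [List.length_append, List.length_cons, List.length_nil]
        push_cast
        simpa using h
      rw [hd]
      have := ih (parts ++ [String.ofList t])
      simp only [stepF] at this
      rw [this]
      simp only [takeCount, if_neg h]
      simp [List.length_append, List.take_cons]

lemma takeCount_bounds (L tl : Int) (htl : 0 < tl) (toks : List (List Char)) :
    ∀ c : Nat, (c : Int) * tl < L → ((c : Int) + toks.length) * tl ≥ L →
    (((c : Int) + takeCount L tl c toks) - 1) * tl < L ∧ L ≤ ((c : Int) + takeCount L tl c toks) * tl := by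
  induction toks with
  | nil =>
    intro c h1 h2
    simp only [List.length_nil, Nat.cast_zero, add_zero] at h2
    linarith
  | cons t ts ih =>
    intro c h1 h2
    by_cases h : ((c : Int) + 1) * tl ≥ L
    · simp only [takeCount, if_pos h]
      push_cast
      constructor <;> [simpa using h1; simpa using h]
    · simp only [takeCount, if_neg h]
      have h1' : ((c + 1 : Nat) : Int) * tl < L := by push_cast; linarith [not_le.mp h]
      have h2' : (((c + 1 : Nat) : Int) + ts.length) * tl ≥ L := by
        push_cast
        push_cast [List.length_cons] at h2
        linarith
      have := ih (c + 1) h1' h2'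
      push_cast at this ⊢
      constructor <;> [linarith [this.1]; linarith [this.2]]

lemma length_prodT (l : List (List Char)) : (prodT l).length = (l.map List.length).prod := by
  induction l with
  | nil => rfl
  | cons s rest ih =>
    simp [prodT, List.length_flatMap, ih, Function.comp, List.map_const', mul_comm]

lemma mem_prodT_length (l : List (List Char)) : ∀ t ∈ prodT l, t.length = l.length := by
  induction l with
  | nil => intro t ht; simp [prodT] at ht; simp [ht]
  | cons s rest ih =>
    intro t ht
    simp only [prodT, List.mem_flatMap, List.mem_map] at ht
    obtain ⟨c, _, t', ht', rfl⟩ := ht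
    simp [ih t' ht']

lemma prodT_append (l : List (List Char)) (s : List Char) :
    prodT (l ++ [s]) = (prodT l).flatMap (fun t => s.map (fun c => t ++ [c])) := by
  induction l with
  | nil =>
    simp only [List.nil_append, prodT]
    induction s <;> simp_all [prodT]
  | cons a l ih =>
    simp only [List.cons_append, prodT, ih]
    simp [List.flatMap_assoc, List.flatMap_map, List.map_flatMap, List.map_map, Function.comp_def, List.cons_append]

lemma flatMap_blocks_getD (s : List Char) (hs : s ≠ []) :
    ∀ (l : List (List Char)) (k : Nat), k < l.length * s.length →
    (l.flatMap (fun t => s.map (fun c => t ++ [c]))).getD k []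
      = l.getD (k / s.length) [] ++ [s.getD (k % s.length) ' '] := by
  have hs0 : 0 < s.length := List.length_pos_iff.mpr hs
  intro l
  induction l with
  | nil => intro k hk; simp at hk
  | cons t l ih =>
    intro k hk
    simp only [List.flatMap_cons]
    by_cases h : k < s.length
    · rw [List.getD_eq_getElem _ _ (by simp [List.length_append]; omega)]
      rw [List.getElem_append_left (by simpa using h)]
      rw [Nat.div_eq_of_lt h, Nat.mod_eq_of_lt h]
      simp only [List.getElem_map, List.getD_cons_zero]
      rw [List.getD_eq_getElem _ _ h]
    · push_neg at h
      have hlen : (s.map (fun c => t ++ [c])).length = s.length := by simp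
      rw [List.getD_eq_getElem?_getD, List.getElem?_append_right (by omega),
          ← List.getD_eq_getElem?_getD, hlen]
      rw [ih (k - s.length) (by simp only [List.length_cons, Nat.succ_mul] at hk; omega)]
      rw [Nat.div_eq_sub_div hs0 h, Nat.mod_eq_sub_mod h]
      simp [List.getD_cons_succ]

lemma tokB_state (l : List (List Char)) :
    ∀ (x : Int) (tok : List Char),
    l.foldl (fun (st : Int × List Char) s =>
      (PySem.Int.floordiv st.1 ((s.length : Int)),
       st.2 ++ [s.getD (PySem.Int.mod st.1 ((s.length : Int))).toNat ' '])) (x, tok)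
    = ((l.foldl (fun (st : Int × List Char) s =>
      (PySem.Int.floordiv st.1 ((s.length : Int)),
       st.2 ++ [s.getD (PySem.Int.mod st.1 ((s.length : Int))).toNat ' '])) (x, [])).1,
       tok ++ (l.foldl (fun (st : Int × List Char) s =>
      (PySem.Int.floordiv st.1 ((s.length : Int)),
       st.2 ++ [s.getD (PySem.Int.mod st.1 ((s.length : Int))).toNat ' '])) (x, [])).2) := by
  induction l with
  | nil => intro x tok; simp
  | cons s l ih =>
    intro x tok
    simp only [List.foldl_cons]
    rw [ih _ (tok ++ _), ih _ ([] ++ _)]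
    simp

lemma tokB_correct (l : List (List Char)) (hne : ∀ s ∈ l, s ≠ []) :
    ∀ k : Nat, k < (prodT l).length → pvTokenB l (k : Int) = (prodT l).getD k [] := by
  induction l using List.reverseRecOn with
  | nil =>
    intro k hk
    simp only [prodT, List.length_cons, List.length_nil] at hk
    interval_cases k
    rfl
  | append_singleton l s ih =>
    intro k hk
    have hsne : s ≠ [] := hne s (by simp)
    have hs0 : 0 < s.length := List.length_pos_iff.mpr hsne
    have hlen : (prodT (l ++ [s])).length = (prodT l).length * s.length := by
      rw [length_prodT, length_prodT]
      simp
    have hdiv : k / s.length < (prodT l).length := by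
      rw [Nat.div_lt_iff_lt_mul hs0]
      omega
    -- unfold one step of B's reversed fold
    have hrev : (l ++ [s]).reverse = s :: l.reverse := by simp
    simp only [pvTokenB, hrev, List.foldl_cons]
    rw [tokB_state]
    have hfd : PySem.Int.floordiv ((k : Nat) : Int) ((s.length : Int)) = ((k / s.length : Nat) : Int) :=
      PySem.Int.floordiv_natCast k s.length
    have hmd : PySem.Int.mod ((k : Nat) : Int) ((s.length : Int)) = ((k % s.length : Nat) : Int) :=
      PySem.Int.mod_natCast k s.length
    simp only [hfd, hmd, Int.toNat_natCast, List.nil_append]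
    have hB := ih (fun t ht => hne t (by simp [ht])) (k / s.length) hdiv
    simp only [pvTokenB] at hB
    have : ([s.getD (k % s.length) ' '] ++
        (List.foldl (fun (st : Int × List Char) s =>
            (PySem.Int.floordiv st.1 ((s.length : Int)),
             st.2 ++ [s.getD (PySem.Int.mod st.1 ((s.length : Int))).toNat ' ']))
            (((k / s.length : Nat) : Int), []) l.reverse).2).reverse
        = (List.foldl (fun (st : Int × List Char) s =>
            (PySem.Int.floordiv st.1 ((s.length : Int)),
             st.2 ++ [s.getD (PySem.Int.mod st.1 ((s.length : Int))).toNat ' ']))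
            (((k / s.length : Nat) : Int), []) l.reverse).2.reverse ++ [s.getD (k % s.length) ' '] := by
      rw [List.reverse_append, List.reverse_singleton]
    have hkbound : k < (prodT l).length * s.length := by rw [← hlen]; exact hk
    rw [this, hB, prodT_append, flatMap_blocks_getD s hsne (prodT l) k hkbound]

lemma range_map_getD {α : Type} (l : List α) (d : α) (m : Nat) (h : m ≤ l.length) :
    (List.range m).map (fun k => l.getD k d) = l.take m := by
  apply List.ext_getElem
  · simp [Nat.min_eq_left h]
  · intro i hi h2
    simp only [List.getElem_map, List.getElem_range, List.getElem_take]
    simp only [List.length_map, List.length_range] at hi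
    rw [List.getD_eq_getElem l d (by omega)]

lemma join_chars (l : List (List Char)) : PySem.Chars.join [] l = l.flatten := by
  induction l with
  | nil => simp [PySem.Chars.join_nil]
  | cons a rest ih =>
    cases rest with
    | nil => simp [PySem.Chars.join_singleton]
    | cons b r => rw [PySem.Chars.join_cons_cons]; simp_all

lemma str_ext {s t : String} (h : s.toList = t.toList) : s = t := by
  exact String.ext (by simpa [String.toList] using h)

lemma join_empty_ofList (l : List (List Char)) :
    PySem.Str.join "" (l.map String.ofList) = String.ofList l.flatten := by
  apply str_ext
  simp [PySem.Str.toList_join, List.map_map, Function.comp_def, join_chars]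

lemma foldl_mul_lengths (l : List String) : ∀ a : Int,
    l.foldl (fun a s => a * ((s.toList.length : Int))) a = a * (((l.map (fun s => s.toList.length)).prod : Nat) : Int) := by
  induction l with
  | nil => intro a; simp
  | cons s rest ih =>
    intro a
    rw [List.foldl_cons, ih, List.map_cons, List.prod_cons]
    push_cast; ring

lemma foldl_pvCsLen (cs : List String) (h : ∀ n ∈ cs, pvValid n) : ∀ a : Int,
    cs.foldl (fun a n => a * pvCsLen n) a = (cs.map pvCs).foldl (fun a s => a * ((s.toList.length : Int))) a := by
  induction cs with
  | nil => intro a; rfl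
  | cons n rest ih =>
    intro a
    simp only [List.foldl_cons, List.map_cons]
    rw [pvCs_len n (h n (by simp)), ih (fun m hm => h m (by simp [hm]))]

lemma max_comb_eq (cs : List String) :
    (cs.map pvCs).foldl (fun a s => a * ((s.toList.length : Int))) 1
      = ((prodT ((cs.map pvCs).map String.toList)).length : Int) := by
  rw [foldl_mul_lengths, length_prodT]
  simp [List.map_map, Function.comp_def]

lemma setsC_ne_nil (cs : List String) (hvalid : ∀ n ∈ cs, pvValid n) :
    ∀ s ∈ (cs.map pvCs).map String.toList, s ≠ [] := by
  intro s hs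
  simp only [List.map_map, List.mem_map, Function.comp_apply] at hs
  obtain ⟨n, hn, rfl⟩ := hs
  exact pvCs_ne_nil n (hvalid n hn)

lemma prodT_pos (l : List (List Char)) (hne : ∀ s ∈ l, s ≠ []) : 0 < (prodT l).length := by
  rw [length_prodT]
  apply List.prod_pos
  intro x hx
  simp only [List.mem_map] at hx
  obtain ⟨s, hs, rfl⟩ := hx
  exact List.length_pos_iff.mpr (hne s hs)

-- A's value in the multi-charset branch, guard passed
lemma A_multi_eval (L : Int) (cs : List String) (hvalid : ∀ n ∈ cs, pvValid n)
    (h1 : cs.length ≠ 1)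
    (hguard : ¬ L > ((prodT ((cs.map pvCs).map String.toList)).length : Int) * (cs.length : Int)) :
    create_pattern L cs
      = PySem.Str.slice (String.ofList (((prodT ((cs.map pvCs).map String.toList)).take
          (takeCount L (cs.length : Int) 0 (prodT ((cs.map pvCs).map String.toList)))).flatten)) none (some L) := by
  unfold create_pattern
  rw [validateA_some cs hvalid]
  simp only [List.length_map]
  rw [if_neg h1, if_neg (by rw [max_comb_eq]; exact hguard)]
  rw [prodLoopA_eq]
  simp only [List.nil_append, List.map_id', List.map_id_fun, id]
  rw [stepF_false]
  simp only [List.length_nil, List.nil_append]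
  rw [join_empty_ofList]

-- B's value in the multi-charset branch for a non-positive length: no token is generated
lemma B_nonpos_eval (L : Int) (cs : List String) (hvalid : ∀ n ∈ cs, pvValid n)
    (h1 : cs.length ≠ 1) (hL : ¬ 0 < L)
    (hguard : ¬ L > ((prodT ((cs.map pvCs).map String.toList)).length : Int) * (cs.length : Int)) :
    create_pattern_alt L cs = PySem.Str.slice (String.ofList []) none (some L) := by
  unfold create_pattern_alt
  rw [validateB_eq, validateA_some cs hvalid]
  simp only [List.length_map]
  rw [if_neg h1, if_neg (by rw [max_comb_eq]; exact hguard)]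
  rw [if_neg (by rintro ⟨-, h⟩; exact hL h)]
  rw [PySem.List.pyRange_one_eq_nil (le_refl 0)]
  rfl

-- B's value in the multi-charset branch for a positive length: exactly as many tokens as A appends
lemma B_pos_eval (L : Int) (cs : List String) (hvalid : ∀ n ∈ cs, pvValid n)
    (h1 : cs.length ≠ 1) (hL : 0 < L)
    (hbound : L ≤ ((prodT ((cs.map pvCs).map String.toList)).length : Int) * (cs.length : Int)) :
    create_pattern_alt L cs
      = PySem.Str.slice (String.ofList (((prodT ((cs.map pvCs).map String.toList)).take
          (takeCount L (cs.length : Int) 0 (prodT ((cs.map pvCs).map String.toList)))).flatten)) none (some L) := by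
  have hne := setsC_ne_nil cs hvalid
  set setsC := (cs.map pvCs).map String.toList with hsetsC
  set P : Nat := (prodT setsC).length with hP
  have hPpos : 0 < P := prodT_pos setsC hne
  have htl : 0 < (cs.length : Int) := by
    by_contra h
    have hcs0 : cs.length = 0 := by omega
    rw [hcs0] at hbound
    simp at hbound
    omega
  set tl : Int := (cs.length : Int) with htldef
  set m : Nat := takeCount L tl 0 (prodT setsC) with hm
  have hbnds := takeCount_bounds L tl htl (prodT setsC) 0 (by simpa using hL)
    (by simpa using hbound)
  rw [← hm] at hbnds
  simp only [Nat.cast_zero, zero_add] at hbnds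
  have hn : -(PySem.Int.floordiv (-L) tl) = (m : Int) :=
    (PySem.Int.neg_floordiv_neg_eq_iff_of_pos htl).mpr ⟨hbnds.1, hbnds.2⟩
  have hmP : m ≤ P := by
    have h2 : ((m : Int) - 1) * tl < (P : Int) * tl := lt_of_lt_of_le hbnds.1 hbound
    have h3 : (m : Int) - 1 < (P : Int) := lt_of_mul_lt_mul_right h2 (le_of_lt htl)
    omega
  unfold create_pattern_alt
  rw [validateB_eq, validateA_some cs hvalid]
  simp only [List.length_map]
  rw [if_neg h1, if_neg (by rw [max_comb_eq]; rw [← hsetsC, ← hP, ← htldef]; omega)]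
  have htl' : (0 : Int) < (cs.length : Int) := by rw [htldef] at htl; exact htl
  rw [if_pos ⟨htl', hL⟩]
  rw [← hsetsC, ← htldef, hn]
  rw [PySem.List.foldl_append_eq_flatMap]
  rw [PySem.List.pyRange_one]
  simp only [sub_zero, Int.toNat_natCast]
  have hpt : ∀ k ∈ List.range m, pvTokenB setsC ((k : Nat) : Int) = (prodT setsC).getD k [] := by
    intro k hk
    exact tokB_correct setsC hne k (lt_of_lt_of_le (List.mem_range.mp hk) hmP)
  rw [List.flatMap_def, List.map_map]
  simp only [Function.comp_def, zero_add]
  rw [List.map_congr_left hpt]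
  rw [range_map_getD (prodT setsC) [] m hmP]
  simp only [List.nil_append]

lemma slice_nonpos_nil (cs : List Char) (L : Int) (hL : L ≤ 0)
    (h : L = 0 ∨ (cs.length : Int) ≤ -L) : PySem.List.slice cs none (some L) = [] := by
  by_cases h0 : L = 0
  · subst h0
    rw [PySem.List.slice_to cs (by omega)]
    simp
  · have hneg : L < 0 := lt_of_le_of_ne hL h0
    have hk0 : 0 < (-L).toNat := by omega
    have hLk : L = -(((-L).toNat : Nat) : Int) := by omega
    rw [hLk, PySem.List.slice_to_neg_natCast cs _ hk0]
    have hle : cs.length ≤ (-L).toNat := by rcases h with h | h <;> omega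
    rw [Nat.sub_eq_zero_of_le hle, List.take_zero]

-- A's value in the multi-charset branch for a non-positive length: the first token, sliced
lemma A_nonpos_eval (L : Int) (cs : List String) (hvalid : ∀ n ∈ cs, pvValid n)
    (h1 : cs.length ≠ 1) (hL : L ≤ 0)
    (hguard : ¬ L > ((prodT ((cs.map pvCs).map String.toList)).length : Int) * (cs.length : Int)) :
    create_pattern L cs
      = PySem.Str.slice (String.ofList ((prodT ((cs.map pvCs).map String.toList)).headD []))
          none (some L) := by
  rw [A_multi_eval L cs hvalid h1 hguard]
  congr 1
  cases htoks : prodT ((cs.map pvCs).map String.toList) with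
  | nil => exact absurd htoks (List.ne_nil_of_length_pos (prodT_pos _ (setsC_ne_nil cs hvalid)))
  | cons t ts =>
    have hc : takeCount L (cs.length : Int) 0 (t :: ts) = 1 := by
      simp only [takeCount]
      rw [if_pos (by push_cast; omega)]
    rw [hc]
    simp

lemma token_len (cs : List String) (hvalid : ∀ n ∈ cs, pvValid n) :
    ((prodT ((cs.map pvCs).map String.toList)).headD []).length = cs.length := by
  cases htoks : prodT ((cs.map pvCs).map String.toList) with
  | nil => exact absurd htoks (List.ne_nil_of_length_pos (prodT_pos _ (setsC_ne_nil cs hvalid)))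
  | cons t ts =>
    have := mem_prodT_length ((cs.map pvCs).map String.toList) t (by rw [htoks]; exact List.mem_cons_self)
    simpa using this

-- ===== VERDICT (by name: the statement is the Claim_ definition above) =====
theorem create_pattern_spec : Claim_unchanged_create_pattern := by
  intro L cs hdom hpre hD
  obtain ⟨hvalid, hbound⟩ := hpre
  show create_pattern L cs = create_pattern_alt L cs
  by_cases h1 : cs.length = 1
  · unfold create_pattern create_pattern_alt
    rw [validateB_eq, validateA_some cs hvalid]
    simp only [List.length_map]
    rw [if_pos h1, if_pos h1]
  · have hb : L ≤ ((prodT ((cs.map pvCs).map String.toList)).length : Int) * (cs.length : Int) := by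
      rcases hbound with h | h
      · exact absurd h h1
      · rw [foldl_pvCsLen cs hvalid 1, max_comb_eq] at h
        exact h
    have hguard := not_lt.mpr hb
    by_cases hL : 0 < L
    · rw [A_multi_eval L cs hvalid h1 hguard, B_pos_eval L cs hvalid h1 hL hb]
    · rw [A_nonpos_eval L cs hvalid h1 (by omega) hguard, B_nonpos_eval L cs hvalid h1 hL hguard]
      apply str_ext
      simp only [PySem.Str.toList_slice, PySem.Chars.slice_eq_listSlice, String.toList_ofList]
      have hcase : L = 0 ∨ (((prodT ((cs.map pvCs).map String.toList)).headD []).length : Int) ≤ -L := by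
        rw [token_len cs hvalid]
        by_cases h0 : L = 0
        · exact Or.inl h0
        · right
          by_contra hgt
          push_neg at hgt
          exact hD ⟨hvalid, by omega, by omega, by omega⟩
      rw [slice_nonpos_nil _ L (by omega) hcase,
          slice_nonpos_nil [] L (by omega) (Or.inr (by simp; omega))]
theorem create_pattern_changed : Claim_changed_create_pattern := by unfold Claim_changed_create_pattern; decide
theorem create_pattern_tight : Claim_exact_create_pattern := by
  intro L cs hdom hpre hD
  obtain ⟨hvalidD, h2, hgt, hneg⟩ := hD
  obtain ⟨hvalid, hbound⟩ := hpre
  have h1 : cs.length ≠ 1 := by omega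
  have hb : L ≤ ((prodT ((cs.map pvCs).map String.toList)).length : Int) * (cs.length : Int) := by
    rcases hbound with h | h
    · exact absurd h h1
    · rw [foldl_pvCsLen cs hvalid 1, max_comb_eq] at h
      exact h
  have hguard := not_lt.mpr hb
  rw [A_nonpos_eval L cs hvalid h1 (by omega) hguard,
      B_nonpos_eval L cs hvalid h1 (by omega) hguard]
  intro heq
  have heq' := congrArg String.toList heq
  simp only [PySem.Str.toList_slice, PySem.Chars.slice_eq_listSlice, String.toList_ofList] at heq'
  rw [slice_nonpos_nil [] L (by omega) (Or.inr (by simp; omega))] at heq'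
  set t := (prodT ((cs.map pvCs).map String.toList)).headD [] with ht
  have htlen : t.length = cs.length := token_len cs hvalid
  have hk0 : 0 < (-L).toNat := by omega
  have hLk : L = -(((-L).toNat : Nat) : Int) := by omega
  rw [hLk, PySem.List.slice_to_neg_natCast t _ hk0] at heq'
  have hlt : (-L).toNat < cs.length := by omega
  have : (t.take (t.length - (-L).toNat)).length = t.length - (-L).toNat := by
    rw [List.length_take]
    omega
  rw [heq'] at this
  simp only [List.length_nil] at this
  omega
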